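-- pv_equiv track=rewrite | github.com/syseitz/predTED | predted/features.py | create_pair_table
-- ===== SOURCE A (Python) =====
-- from typing import List, Tuple
--
-- def create_pair_table(structure: str) -> List[int]:
--     """Create a 1-based pair table.
--
--     ``pt[0]`` is unused (set to 0).  For *i* in 1..n, ``pt[i]`` is the
--     1-based index of the pairing partner, or 0 if position *i* is unpaired.
--     """
--     n = len(structure)
--     pt = [0] * (n + 1)
--     stack: List[int] = []
--     for i, c in enumerate(structure):
--         if c == '(':
--             stack.append(i + 1)
--         elif c == ')' and stack:
--             j = stack.pop()
--             pt[j] = i + 1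
--             pt[i + 1] = j
--     return pt
-- ===== SOURCE B (Python) =====
-- def create_pair_table(structure):
--     """Create a 1-based pair table without a stack: for each '(' scan
--     forward with a depth counter to find its matching ')'."""
--     n = len(structure)
--     pt = [0] * (n + 1)
--     for i, c in enumerate(structure):
--         if c == '(':
--             depth = 1
--             for j in range(i + 1, n):
--                 if structure[j] == '(':
--                     depth += 1
--                 elif structure[j] == ')':
--                     depth -= 1
--                     if depth == 0:
--                         pt[i + 1] = j + 1
--                         pt[j + 1] = i + 1
--                         break
--     return pt
-- ===== Notes on version B (the rewrite author's own statement) =====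
-- stated objective: alternative
-- what changed: Replaces A's single-pass stack matching with stackless nested forward scans: each '(' finds its partner by a depth counter over the suffix.
import Mathlib
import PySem

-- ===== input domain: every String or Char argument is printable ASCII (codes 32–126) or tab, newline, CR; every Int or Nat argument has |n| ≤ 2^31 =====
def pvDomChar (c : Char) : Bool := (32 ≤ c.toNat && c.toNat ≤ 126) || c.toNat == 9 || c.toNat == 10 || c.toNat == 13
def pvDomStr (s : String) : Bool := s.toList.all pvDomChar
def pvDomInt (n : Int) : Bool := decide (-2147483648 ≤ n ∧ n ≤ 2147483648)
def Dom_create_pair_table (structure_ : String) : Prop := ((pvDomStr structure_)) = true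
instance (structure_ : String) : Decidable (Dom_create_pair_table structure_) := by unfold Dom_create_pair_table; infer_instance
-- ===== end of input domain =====

-- B replaces A's single-pass stack matching by stackless nested forward scans (a depth
-- counter per '('): an alternative decomposition of the same exact pair table, not faster.

-- ===== PORT A =====
-- A's for-loop over enumerate(structure) as structural recursion carrying the index i,
-- the table pt and the stack (Python list end = Lean list head; append/pop = cons/uncons).
def aLoop : List Char → Nat → List Int → List Nat → List Int
  | [], _, pt, _ => pt
  | c :: rest, i, pt, stack =>
    if c = '(' then aLoop rest (i+1) pt ((i+1) :: stack)
    else if c = ')' then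
      -- `elif c == ')' and stack:` — empty stack falls through unchanged
      match stack with
      | [] => aLoop rest (i+1) pt []
      | j :: st => aLoop rest (i+1) ((pt.set j ((i+1 : Nat) : Int)).set (i+1) (j : Int)) st
    else aLoop rest (i+1) pt stack

def create_pair_table (structure_ : String) : List Int :=
  aLoop structure_.toList 0 (List.replicate (structure_.toList.length + 1) 0) []

-- ===== PORT B =====
-- Source B's inner `for j in range(i+1, n)` scans exactly the suffix after position i; here the
-- suffix is the remaining list, j carried as a counter.  Source B decrements depth then tests
-- `depth == 0`; with depth ≥ 1 throughout that is `depth = 1` before decrementing — exact.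
def findMatch : List Char → Nat → Nat → Option Nat
  | [], _, _ => none
  | c :: rest, j, depth =>
    if c = '(' then findMatch rest (j+1) (depth+1)
    else if c = ')' then
      if depth = 1 then some j
      else findMatch rest (j+1) (depth-1)
    else findMatch rest (j+1) depth

def bLoop : List Char → Nat → List Int → List Int
  | [], _, pt => pt
  | c :: rest, i, pt =>
    if c = '(' then
      match findMatch rest (i+1) 1 with
      | some j => bLoop rest (i+1) ((pt.set (i+1) ((j+1 : Nat) : Int)).set (j+1) ((i+1 : Nat) : Int))
      | none => bLoop rest (i+1) pt
    else bLoop rest (i+1) pt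

def create_pair_table_alt (structure_ : String) : List Int :=
  bLoop structure_.toList 0 (List.replicate (structure_.toList.length + 1) 0)

-- ===== PRECONDITION & SPEC =====
def Spec_create_pair_table (structure_ : String) (out : List Int) : Prop := out = create_pair_table_alt structure_
instance (structure_ : String) (out : List Int) : Decidable (Spec_create_pair_table structure_ out) := by unfold Spec_create_pair_table; infer_instance

-- ===== CLAIM (what is proved, stated in full; the proofs are below) =====
def Claim_equal_create_pair_table : Prop := ∀ (structure_ : String), Dom_create_pair_table structure_ → Spec_create_pair_table structure_ (create_pair_table structure_)

-- ===== LEMMAS AND PROOFS =====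

-- The matched pairs (1-based open, 1-based close) emitted by A's stack loop, in emission order.
def pairsAAux : List Char → Nat → List Nat → List (Nat × Nat)
  | [], _, _ => []
  | c :: rest, i, stack =>
    if c = '(' then pairsAAux rest (i+1) ((i+1) :: stack)
    else if c = ')' then
      match stack with
      | [] => pairsAAux rest (i+1) []
      | j :: st => (j, i+1) :: pairsAAux rest (i+1) st
    else pairsAAux rest (i+1) stack

-- The matched pairs found by B's scans, in open order.
def pairsBAux : List Char → Nat → List (Nat × Nat)
  | [], _ => []
  | c :: rest, i =>
    if c = '(' then
      match findMatch rest (i+1) 1 with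
      | some j => (i+1, j+1) :: pairsBAux rest (i+1)
      | none => pairsBAux rest (i+1)
    else pairsBAux rest (i+1)

def writesOf (ps : List (Nat × Nat)) : List (Nat × Int) :=
  ps.flatMap (fun x => [(x.1, (x.2 : Int)), (x.2, (x.1 : Int))])

def applyWrites (pt : List Int) (ws : List (Nat × Int)) : List Int :=
  ws.foldl (fun p w => p.set w.1 w.2) pt

-- ---------- characterisation of the pair lists ----------

lemma mem_pairsAAux (rest : List Char) : ∀ (k : Nat) (stack : List Nat) (p q : Nat),
    (p, q) ∈ pairsAAux rest k stack ↔
      ((∃ d j, stack[d]? = some p ∧ findMatch rest k (d+1) = some j ∧ q = j+1)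
        ∨ (∃ m j, rest[m]? = some '(' ∧ p = k+m+1 ∧
            findMatch (rest.drop (m+1)) (k+m+1) 1 = some j ∧ q = j+1)) := by
  induction rest with
  | nil => intro k stack p q; simp [pairsAAux, findMatch]
  | cons c rest ih =>
    intro k stack p q
    by_cases hco : c = '('
    · subst hco
      rw [show pairsAAux ('(' :: rest) k stack = pairsAAux rest (k+1) ((k+1) :: stack) from by
        simp [pairsAAux]]
      rw [ih]
      constructor
      · rintro (⟨d, j, hd, hf, hq⟩ | ⟨m, j, hm, hp, hf, hq⟩)
        · cases d with
          | zero =>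
            simp at hd
            exact Or.inr ⟨0, j, by simp, by omega, by simpa [findMatch] using hf, hq⟩
          | succ d =>
            refine Or.inl ⟨d, j, by simpa using hd, ?_, hq⟩
            simpa [findMatch] using hf
        · refine Or.inr ⟨m+1, j, by simpa using hm, by omega, ?_, hq⟩
          have e : k + (m+1) + 1 = k + 1 + m + 1 := by omega
          simpa [e] using hf
      · rintro (⟨d, j, hd, hf, hq⟩ | ⟨m, j, hm, hp, hf, hq⟩)
        · refine Or.inl ⟨d+1, j, by simpa using hd, ?_, hq⟩
          simpa [findMatch] using hf
        · cases m with
          | zero =>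
            refine Or.inl ⟨0, j, by simp; omega, ?_, hq⟩
            simpa [findMatch] using hf
          | succ m =>
            refine Or.inr ⟨m, j, by simpa using hm, by omega, ?_, hq⟩
            have e : k + 1 + m + 1 = k + (m+1) + 1 := by omega
            simpa [e] using hf
    · by_cases hcc : c = ')'
      · subst hcc
        cases stack with
        | nil =>
          rw [show pairsAAux (')' :: rest) k [] = pairsAAux rest (k+1) [] from by
            simp [pairsAAux]]
          rw [ih]
          constructor
          · rintro (⟨d, j, hd, _, _⟩ | ⟨m, j, hm, hp, hf, hq⟩)
            · simp at hd
            · refine Or.inr ⟨m+1, j, by simpa using hm, by omega, ?_, hq⟩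
              have e : k + (m+1) + 1 = k + 1 + m + 1 := by omega
              simpa [e] using hf
          · rintro (⟨d, j, hd, _, _⟩ | ⟨m, j, hm, hp, hf, hq⟩)
            · simp at hd
            · cases m with
              | zero => simp at hm
              | succ m =>
                refine Or.inr ⟨m, j, by simpa using hm, by omega, ?_, hq⟩
                have e : k + 1 + m + 1 = k + (m+1) + 1 := by omega
                simpa [e] using hf
        | cons s0 st =>
          rw [show pairsAAux (')' :: rest) k (s0 :: st)
              = (s0, k+1) :: pairsAAux rest (k+1) st from by simp [pairsAAux]]
          rw [List.mem_cons, ih]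
          constructor
          · rintro (heq | ⟨d, j, hd, hf, hq⟩ | ⟨m, j, hm, hp, hf, hq⟩)
            · obtain ⟨hp, hq⟩ := Prod.mk.inj heq
              exact Or.inl ⟨0, k, by simp [hp], by simp [findMatch], by omega⟩
            · refine Or.inl ⟨d+1, j, by simpa using hd, ?_, hq⟩
              simpa [findMatch] using hf
            · refine Or.inr ⟨m+1, j, by simpa using hm, by omega, ?_, hq⟩
              have e : k + (m+1) + 1 = k + 1 + m + 1 := by omega
              simpa [e] using hf
          · rintro (⟨d, j, hd, hf, hq⟩ | ⟨m, j, hm, hp, hf, hq⟩)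
            · cases d with
              | zero =>
                simp [findMatch] at hd hf
                exact Or.inl (by simp [hd, hf, hq])
              | succ d =>
                refine Or.inr (Or.inl ⟨d, j, by simpa using hd, ?_, hq⟩)
                simpa [findMatch] using hf
            · cases m with
              | zero => simp at hm
              | succ m =>
                refine Or.inr (Or.inr ⟨m, j, by simpa using hm, by omega, ?_, hq⟩)
                have e : k + 1 + m + 1 = k + (m+1) + 1 := by omega
                simpa [e] using hf
      · rw [show pairsAAux (c :: rest) k stack = pairsAAux rest (k+1) stack from by
          simp [pairsAAux, hco, hcc]]
        rw [ih]
        constructor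
        · rintro (⟨d, j, hd, hf, hq⟩ | ⟨m, j, hm, hp, hf, hq⟩)
          · refine Or.inl ⟨d, j, hd, ?_, hq⟩
            simpa [findMatch, hco, hcc] using hf
          · refine Or.inr ⟨m+1, j, by simpa using hm, by omega, ?_, hq⟩
            have e : k + (m+1) + 1 = k + 1 + m + 1 := by omega
            simpa [e] using hf
        · rintro (⟨d, j, hd, hf, hq⟩ | ⟨m, j, hm, hp, hf, hq⟩)
          · refine Or.inl ⟨d, j, hd, ?_, hq⟩
            simpa [findMatch, hco, hcc] using hf
          · cases m with
            | zero => simp [hco] at hm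
            | succ m =>
              refine Or.inr ⟨m, j, by simpa using hm, by omega, ?_, hq⟩
              have e : k + 1 + m + 1 = k + (m+1) + 1 := by omega
              simpa [e] using hf

lemma mem_pairsBAux (rest : List Char) : ∀ (k : Nat) (p q : Nat),
    (p, q) ∈ pairsBAux rest k ↔
      ∃ m j, rest[m]? = some '(' ∧ p = k+m+1 ∧
        findMatch (rest.drop (m+1)) (k+m+1) 1 = some j ∧ q = j+1 := by
  induction rest with
  | nil => intro k p q; simp [pairsBAux]
  | cons c rest ih =>
    intro k p q
    by_cases hco : c = '('
    · subst hco
      cases hfm : findMatch rest (k+1) 1 with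
      | some j0 =>
        rw [show pairsBAux ('(' :: rest) k = (k+1, j0+1) :: pairsBAux rest (k+1) from by
          simp [pairsBAux, hfm]]
        rw [List.mem_cons, ih]
        constructor
        · rintro (heq | ⟨m, j, hm, hp, hf, hq⟩)
          · refine ⟨0, j0, by simp, ?_, ?_, ?_⟩
            · simpa using congrArg Prod.fst heq
            · simpa using hfm
            · simpa using congrArg Prod.snd heq
          · refine ⟨m+1, j, by simpa using hm, by omega, ?_, hq⟩
            have e : k + (m+1) + 1 = k + 1 + m + 1 := by omega
            simpa [e] using hf
        · rintro ⟨m, j, hm, hp, hf, hq⟩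
          cases m with
          | zero =>
            simp at hf
            rw [hfm] at hf
            exact Or.inl (by simp at hf; simp [hp, hq, hf])
          | succ m =>
            refine Or.inr ⟨m, j, by simpa using hm, by omega, ?_, hq⟩
            have e : k + 1 + m + 1 = k + (m+1) + 1 := by omega
            simpa [e] using hf
      | none =>
        rw [show pairsBAux ('(' :: rest) k = pairsBAux rest (k+1) from by
          simp [pairsBAux, hfm]]
        rw [ih]
        constructor
        · rintro ⟨m, j, hm, hp, hf, hq⟩
          refine ⟨m+1, j, by simpa using hm, by omega, ?_, hq⟩
          have e : k + (m+1) + 1 = k + 1 + m + 1 := by omega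
          simpa [e] using hf
        · rintro ⟨m, j, hm, hp, hf, hq⟩
          cases m with
          | zero => simp at hf; rw [hfm] at hf; simp at hf
          | succ m =>
            refine ⟨m, j, by simpa using hm, by omega, ?_, hq⟩
            have e : k + 1 + m + 1 = k + (m+1) + 1 := by omega
            simpa [e] using hf
    · rw [show pairsBAux (c :: rest) k = pairsBAux rest (k+1) from by simp [pairsBAux, hco]]
      rw [ih]
      constructor
      · rintro ⟨m, j, hm, hp, hf, hq⟩
        refine ⟨m+1, j, by simpa using hm, by omega, ?_, hq⟩
        have e : k + (m+1) + 1 = k + 1 + m + 1 := by omega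
        simpa [e] using hf
      · rintro ⟨m, j, hm, hp, hf, hq⟩
        cases m with
        | zero => simp [hco] at hm
        | succ m =>
          refine ⟨m, j, by simpa using hm, by omega, ?_, hq⟩
          have e : k + 1 + m + 1 = k + (m+1) + 1 := by omega
          simpa [e] using hf

-- ---------- facts needed for functionality of the writes ----------

lemma findMatch_close (l : List Char) : ∀ (k d j : Nat), findMatch l k d = some j →
    ∃ m, l[m]? = some ')' ∧ j = k + m := by
  induction l with
  | nil => intro k d j h; simp [findMatch] at h
  | cons c rest ih =>
    intro k d j h
    by_cases hco : c = '('
    · simp [findMatch, hco] at h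
      obtain ⟨m, hm, hj⟩ := ih (k+1) (d+1) j h
      exact ⟨m+1, by simpa using hm, by omega⟩
    · by_cases hcc : c = ')'
      · by_cases hd : d = 1
        · simp [findMatch, hco, hcc, hd] at h
          exact ⟨0, by simp [hcc], by omega⟩
        · simp [findMatch, hco, hcc, hd] at h
          obtain ⟨m, hm, hj⟩ := ih (k+1) (d-1) j h
          exact ⟨m+1, by simpa using hm, by omega⟩
      · simp [findMatch, hco, hcc] at h
        obtain ⟨m, hm, hj⟩ := ih (k+1) d j h
        exact ⟨m+1, by simpa using hm, by omega⟩

lemma pairsAAux_close_lt (rest : List Char) : ∀ (k : Nat) (stack : List Nat),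
    ∀ x ∈ pairsAAux rest k stack, k < x.2 := by
  induction rest with
  | nil => intro k stack x hx; simp [pairsAAux] at hx
  | cons c rest ih =>
    intro k stack x hx
    by_cases hco : c = '('
    · rw [show pairsAAux (c :: rest) k stack = pairsAAux rest (k+1) ((k+1) :: stack) from by
        simp [pairsAAux, hco]] at hx
      have := ih (k+1) _ x hx; omega
    · by_cases hcc : c = ')'
      · cases stack with
        | nil =>
          rw [show pairsAAux (c :: rest) k [] = pairsAAux rest (k+1) [] from by
            simp [pairsAAux, hco, hcc]] at hx
          have := ih (k+1) _ x hx; omega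
        | cons s0 st =>
          rw [show pairsAAux (c :: rest) k (s0 :: st)
              = (s0, k+1) :: pairsAAux rest (k+1) st from by simp [pairsAAux, hco, hcc]] at hx
          rcases List.mem_cons.mp hx with h | h
          · simp [h]
          · have := ih (k+1) _ x h; omega
      · rw [show pairsAAux (c :: rest) k stack = pairsAAux rest (k+1) stack from by
          simp [pairsAAux, hco, hcc]] at hx
        have := ih (k+1) _ x hx; omega

lemma pairsAAux_pairwise (rest : List Char) : ∀ (k : Nat) (stack : List Nat),
    (pairsAAux rest k stack).Pairwise (fun a b => a.2 < b.2) := by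
  induction rest with
  | nil => intro k stack; simp [pairsAAux]
  | cons c rest ih =>
    intro k stack
    by_cases hco : c = '('
    · rw [show pairsAAux (c :: rest) k stack = pairsAAux rest (k+1) ((k+1) :: stack) from by
        simp [pairsAAux, hco]]
      exact ih (k+1) _
    · by_cases hcc : c = ')'
      · cases stack with
        | nil =>
          rw [show pairsAAux (c :: rest) k [] = pairsAAux rest (k+1) [] from by
            simp [pairsAAux, hco, hcc]]
          exact ih (k+1) _
        | cons s0 st =>
          rw [show pairsAAux (c :: rest) k (s0 :: st)
              = (s0, k+1) :: pairsAAux rest (k+1) st from by simp [pairsAAux, hco, hcc]]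
          refine List.Pairwise.cons ?_ (ih (k+1) _)
          intro x hx
          exact pairsAAux_close_lt rest (k+1) st x hx
      · rw [show pairsAAux (c :: rest) k stack = pairsAAux rest (k+1) stack from by
          simp [pairsAAux, hco, hcc]]
        exact ih (k+1) _

lemma snd_inj_of_pairwise {l : List (Nat × Nat)} (h : l.Pairwise (fun a b => a.2 < b.2)) :
    ∀ x1 ∈ l, ∀ x2 ∈ l, x1.2 = x2.2 → x1 = x2 := by
  induction l with
  | nil => simp
  | cons a t ih =>
    rcases List.pairwise_cons.mp h with ⟨ha, ht⟩
    intro x1 h1 x2 h2 he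
    rcases List.mem_cons.mp h1 with h1 | h1 <;> rcases List.mem_cons.mp h2 with h2 | h2
    · rw [h1, h2]
    · have := ha x2 h2; rw [h1] at he; exact absurd he (by omega)
    · have := ha x1 h1; rw [h2] at he; exact absurd he (by omega)
    · exact ih ht x1 h1 x2 h2 he

-- ---------- writes machinery ----------

lemma mem_writesOf {ps : List (Nat × Nat)} {w : Nat × Int} :
    w ∈ writesOf ps ↔ ∃ x ∈ ps, w = (x.1, (x.2 : Int)) ∨ w = (x.2, (x.1 : Int)) := by
  simp [writesOf]

lemma applyWrites_get?_not_mem (ws : List (Nat × Int)) : ∀ (pt : List Int) (q : Nat),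
    (∀ v, (q, v) ∉ ws) → (applyWrites pt ws)[q]? = pt[q]? := by
  induction ws with
  | nil => intro pt q _; simp [applyWrites]
  | cons w t ih =>
    intro pt q h
    have hne : w.1 ≠ q := by
      intro he; exact h w.2 (by simp [← he])
    have ht : ∀ v, (q, v) ∉ t := fun v hv => h v (List.mem_cons_of_mem _ hv)
    calc (applyWrites pt (w :: t))[q]? = (applyWrites (pt.set w.1 w.2) t)[q]? := by
          simp [applyWrites, List.foldl_cons]
      _ = (pt.set w.1 w.2)[q]? := ih _ q ht
      _ = pt[q]? := List.getElem?_set_ne hne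

lemma applyWrites_get?_mem (ws : List (Nat × Int)) : ∀ (pt : List Int) (q : Nat) (v : Int),
    (q, v) ∈ ws → (∀ v1 v2, (q, v1) ∈ ws → (q, v2) ∈ ws → v1 = v2) →
    (applyWrites pt ws)[q]? = if q < pt.length then some v else none := by
  induction ws with
  | nil => intro pt q v h _; simp at h
  | cons w t ih =>
    intro pt q v hm hfunc
    have hstep : applyWrites pt (w :: t) = applyWrites (pt.set w.1 w.2) t := by
      simp [applyWrites, List.foldl_cons]
    have hfunct : ∀ v1 v2, (q, v1) ∈ t → (q, v2) ∈ t → v1 = v2 := fun v1 v2 h1 h2 =>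
      hfunc v1 v2 (List.mem_cons_of_mem _ h1) (List.mem_cons_of_mem _ h2)
    by_cases hqt : ∃ v', (q, v') ∈ t
    · obtain ⟨v', hv'⟩ := hqt
      have : v' = v := hfunc v' v (List.mem_cons_of_mem _ hv') hm
      subst this
      rw [hstep, ih _ q v' hv' hfunct, List.length_set]
    · have ht : ∀ v', (q, v') ∉ t := fun v' hv' => hqt ⟨v', hv'⟩
      have hw : w = (q, v) := by
        rcases List.mem_cons.mp hm with h | h
        · exact h.symm
        · exact absurd h (ht v)
      rw [hstep, applyWrites_get?_not_mem t _ q ht, hw]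
      by_cases hlt : q < pt.length
      · simp [hlt, List.getElem?_set_self hlt]
      · simp [hlt, List.getElem?_eq_none (by simpa using Nat.le_of_not_lt hlt)]

lemma applyWrites_ext {ws1 ws2 : List (Nat × Int)} (pt : List Int)
    (hmem : ∀ w, w ∈ ws1 ↔ w ∈ ws2)
    (hfunc : ∀ q v1 v2, (q, v1) ∈ ws1 → (q, v2) ∈ ws1 → v1 = v2) :
    applyWrites pt ws1 = applyWrites pt ws2 := by
  apply List.ext_getElem?
  intro q
  by_cases hq : ∃ v, (q, v) ∈ ws1
  · obtain ⟨v, hv⟩ := hq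
    rw [applyWrites_get?_mem ws1 pt q v hv (hfunc q),
        applyWrites_get?_mem ws2 pt q v ((hmem _).mp hv)
          (fun v1 v2 h1 h2 => hfunc q v1 v2 ((hmem _).mpr h1) ((hmem _).mpr h2))]
  · have h1 : ∀ v, (q, v) ∉ ws1 := fun v hv => hq ⟨v, hv⟩
    have h2 : ∀ v, (q, v) ∉ ws2 := fun v hv => hq ⟨v, (hmem _).mpr hv⟩
    rw [applyWrites_get?_not_mem ws1 pt q h1, applyWrites_get?_not_mem ws2 pt q h2]

-- ---------- the two loops compute applyWrites of their pair lists ----------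

lemma aLoop_eq (rest : List Char) : ∀ (k : Nat) (pt : List Int) (stack : List Nat),
    aLoop rest k pt stack = applyWrites pt (writesOf (pairsAAux rest k stack)) := by
  induction rest with
  | nil => intro k pt stack; simp [aLoop, pairsAAux, writesOf, applyWrites]
  | cons c rest ih =>
    intro k pt stack
    by_cases hco : c = '('
    · simp only [aLoop, pairsAAux, hco, if_pos rfl]
      exact ih (k+1) pt ((k+1) :: stack)
    · by_cases hcc : c = ')'
      · cases stack with
        | nil =>
          simp only [aLoop, pairsAAux, hco, hcc, if_neg hco, if_pos rfl]
          exact ih (k+1) pt []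
        | cons s0 st =>
          simp only [aLoop, pairsAAux, hco, hcc, if_neg hco, if_pos rfl]
          rw [ih (k+1) _ st]
          simp [writesOf, applyWrites, List.flatMap_cons, List.foldl_cons]
      · simp only [aLoop, pairsAAux, if_neg hco, if_neg hcc]
        exact ih (k+1) pt stack

lemma bLoop_eq (rest : List Char) : ∀ (k : Nat) (pt : List Int),
    bLoop rest k pt = applyWrites pt (writesOf (pairsBAux rest k)) := by
  induction rest with
  | nil => intro k pt; simp [bLoop, pairsBAux, writesOf, applyWrites]
  | cons c rest ih =>
    intro k pt
    by_cases hco : c = '('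
    · cases hfm : findMatch rest (k+1) 1 with
      | some j =>
        simp only [bLoop, pairsBAux, hco, if_pos rfl, hfm]
        rw [ih (k+1) _]
        simp [writesOf, applyWrites, List.flatMap_cons, List.foldl_cons]
      | none =>
        simp only [bLoop, pairsBAux, hco, if_pos rfl, hfm]
        exact ih (k+1) pt
    · simp only [bLoop, pairsBAux, if_neg hco]
      exact ih (k+1) pt

-- ---------- same write-set, functional write-set ----------

-- the common characterisation of a matched pair at top level
def PairOf (s : List Char) (p q : Nat) : Prop :=
  ∃ m j, s[m]? = some '(' ∧ p = m+1 ∧ findMatch (s.drop (m+1)) (m+1) 1 = some j ∧ q = j+1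

lemma mem_pairsA_iff (s : List Char) (p q : Nat) :
    (p, q) ∈ pairsAAux s 0 [] ↔ PairOf s p q := by
  rw [mem_pairsAAux]
  constructor
  · rintro (⟨d, j, hd, _, _⟩ | ⟨m, j, hm, hp, hf, hq⟩)
    · simp at hd
    · exact ⟨m, j, hm, by omega, by simpa using hf, hq⟩
  · rintro ⟨m, j, hm, hp, hf, hq⟩
    exact Or.inr ⟨m, j, hm, by omega, by simpa using hf, hq⟩

lemma mem_pairsB_iff (s : List Char) (p q : Nat) :
    (p, q) ∈ pairsBAux s 0 ↔ PairOf s p q := by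
  rw [mem_pairsBAux]
  constructor
  · rintro ⟨m, j, hm, hp, hf, hq⟩
    exact ⟨m, j, hm, by omega, by simpa using hf, hq⟩
  · rintro ⟨m, j, hm, hp, hf, hq⟩
    exact ⟨m, j, hm, by omega, by simpa using hf, hq⟩

-- open position has '(' ; close position has ')'
lemma PairOf_open {s : List Char} {p q : Nat} (h : PairOf s p q) : s[p-1]? = some '(' := by
  obtain ⟨m, j, hm, hp, _, _⟩ := h
  simpa [hp] using hm

lemma PairOf_close {s : List Char} {p q : Nat} (h : PairOf s p q) : s[q-1]? = some ')' := by
  obtain ⟨m, j, hm, hp, hf, hq⟩ := h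
  obtain ⟨m', hm', hj⟩ := findMatch_close _ _ _ _ hf
  rw [List.getElem?_drop] at hm'
  have : q - 1 = m + 1 + m' := by omega
  rw [this]; exact hm'

lemma PairOf_funct {s : List Char} {p q1 q2 : Nat} (h1 : PairOf s p q1) (h2 : PairOf s p q2) :
    q1 = q2 := by
  obtain ⟨m1, j1, hm1, hp1, hf1, hq1⟩ := h1
  obtain ⟨m2, j2, hm2, hp2, hf2, hq2⟩ := h2
  have : m1 = m2 := by omega
  subst this
  rw [hf1] at hf2
  simp at hf2
  omega

lemma writesA_funct (s : List Char) : ∀ (q : Nat) (v1 v2 : Int),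
    (q, v1) ∈ writesOf (pairsAAux s 0 []) → (q, v2) ∈ writesOf (pairsAAux s 0 []) → v1 = v2 := by
  intro q v1 v2 h1 h2
  rw [mem_writesOf] at h1 h2
  obtain ⟨x1, hx1, hw1⟩ := h1
  obtain ⟨x2, hx2, hw2⟩ := h2
  have hc1 : PairOf s x1.1 x1.2 := (mem_pairsA_iff s x1.1 x1.2).mp (by simpa using hx1)
  have hc2 : PairOf s x2.1 x2.2 := (mem_pairsA_iff s x2.1 x2.2).mp (by simpa using hx2)
  rcases hw1 with hw1 | hw1 <;> rcases hw2 with hw2 | hw2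
  · -- both open writes: q = x1.1 = x2.1
    have e1 : q = x1.1 ∧ v1 = (x1.2 : Int) := by
      constructor <;> [exact congrArg Prod.fst hw1; exact congrArg Prod.snd hw1]
    have e2 : q = x2.1 ∧ v2 = (x2.2 : Int) := by
      constructor <;> [exact congrArg Prod.fst hw2; exact congrArg Prod.snd hw2]
    have : x1.2 = x2.2 := PairOf_funct (e1.1 ▸ hc1) (e2.1 ▸ hc2)
    rw [e1.2, e2.2, this]
  · -- open vs close: s[q-1] would be both '(' and ')'
    have e1 : q = x1.1 := congrArg Prod.fst hw1
    have e2 : q = x2.2 := congrArg Prod.fst hw2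
    have ho : s[q-1]? = some '(' := e1 ▸ PairOf_open hc1
    have hc : s[q-1]? = some ')' := e2 ▸ PairOf_close hc2
    rw [ho] at hc; simp at hc
  · have e1 : q = x1.2 := congrArg Prod.fst hw1
    have e2 : q = x2.1 := congrArg Prod.fst hw2
    have ho : s[q-1]? = some '(' := e2 ▸ PairOf_open hc2
    have hc : s[q-1]? = some ')' := e1 ▸ PairOf_close hc1
    rw [ho] at hc; simp at hc
  · -- both close writes: same snd ⇒ same pair by pairwise-increasing closes
    have e1 : q = x1.2 ∧ v1 = (x1.1 : Int) := by
      constructor <;> [exact congrArg Prod.fst hw1; exact congrArg Prod.snd hw1]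
    have e2 : q = x2.2 ∧ v2 = (x2.1 : Int) := by
      constructor <;> [exact congrArg Prod.fst hw2; exact congrArg Prod.snd hw2]
    have hx : x1 = x2 :=
      snd_inj_of_pairwise (pairsAAux_pairwise s 0 []) x1 hx1 x2 hx2 (by omega)
    rw [e1.2, e2.2, hx]

-- ===== VERDICT (by name: the statement is the Claim_ definition above) =====
theorem create_pair_table_spec : Claim_equal_create_pair_table := by
  intro s _
  unfold Spec_create_pair_table create_pair_table create_pair_table_alt
  rw [aLoop_eq, bLoop_eq]
  apply applyWrites_ext
  · intro w
    rw [mem_writesOf, mem_writesOf]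
    constructor
    · rintro ⟨x, hx, hw⟩
      exact ⟨x, (mem_pairsB_iff _ x.1 x.2).mpr ((mem_pairsA_iff _ x.1 x.2).mp (by simpa using hx)), hw⟩
    · rintro ⟨x, hx, hw⟩
      exact ⟨x, (mem_pairsA_iff _ x.1 x.2).mpr ((mem_pairsB_iff _ x.1 x.2).mp (by simpa using hx)), hw⟩
  · exact writesA_funct s.toList
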